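-- pv_equiv track=rewrite | github.com/mitei1720/discordbot | libs/goma_util.py | gomajoin
-- ===== SOURCE A (Python) =====
-- def gomajoin(step1):
--     result = []
--     for  word in step1:
--         if not result:
--             result.append(word)
--         else:
--             if word[0] == result[-1][1]:
--                 result[-1] = (result[-1][0], word[1], max(word[2],result[-1][2]), result[-1][3] + result[-1][4], word[4])
--             else:
--                 result.append(word)
--     return result
-- ===== SOURCE B (Python) =====
-- def gomajoin(step1):
--     if not step1:
--         return []
--     # partition into maximal runs where each tuple's [0] equals the previous tuple's [1]
--     runs = []
--     cur = [step1[0]]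
--     for w in step1[1:]:
--         if w[0] == cur[-1][1]:
--             cur.append(w)
--         else:
--             runs.append(cur)
--             cur = [w]
--     runs.append(cur)
--     # one output tuple per run, via closed formulas over the run
--     out = []
--     for run in runs:
--         first, last = run[0], run[-1]
--         out.append((first[0], last[1],
--                     max(t[2] for t in run),
--                     first[3] + sum(t[4] for t in run[:-1]),
--                     last[4]))
--     return out
-- ===== Notes on version B (the rewrite author's own statement) =====
-- stated objective: alternative
-- what changed: B first partitions the input into maximal mergeable runs and then maps each run to one output tuple via closed formulas (max/sum over the run), instead of A's in-place rewriting of the last element of the growing result.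
import Mathlib
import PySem

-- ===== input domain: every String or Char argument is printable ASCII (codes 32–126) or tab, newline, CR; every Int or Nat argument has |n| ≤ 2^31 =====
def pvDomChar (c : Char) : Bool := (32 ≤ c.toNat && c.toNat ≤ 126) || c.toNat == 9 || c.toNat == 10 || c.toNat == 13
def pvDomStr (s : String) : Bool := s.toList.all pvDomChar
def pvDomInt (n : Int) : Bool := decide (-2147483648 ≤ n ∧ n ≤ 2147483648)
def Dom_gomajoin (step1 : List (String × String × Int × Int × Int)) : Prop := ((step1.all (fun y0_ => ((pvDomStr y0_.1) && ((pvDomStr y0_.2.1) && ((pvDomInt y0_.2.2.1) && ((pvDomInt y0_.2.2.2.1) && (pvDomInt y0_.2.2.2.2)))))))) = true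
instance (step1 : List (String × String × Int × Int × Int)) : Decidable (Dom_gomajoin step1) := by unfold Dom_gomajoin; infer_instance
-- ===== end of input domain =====

-- B partitions the input into maximal mergeable runs and maps each run to one tuple via
-- closed formulas (max/sum over the run), instead of A's in-place rewrite of the last
-- result element; same asymptotic cost (objective: alternative).

-- ===== PORT A =====
-- loop body of A: 'if not result: append; elif word[0]==result[-1][1]: result[-1]=…; else: append'
def pvStepA (result : List (String × String × Int × Int × Int))
    (word : String × String × Int × Int × Int) : List (String × String × Int × Int × Int) :=
  match result.getLast? with
  | none => result ++ [word]
  | some l =>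
    if word.1 = l.2.1 then
      result.dropLast ++
        [(l.1, word.2.1, max word.2.2.1 l.2.2.1, l.2.2.2.1 + l.2.2.2.2, word.2.2.2.2)]
    else
      result ++ [word]

def gomajoin (step1 : List (String × String × Int × Int × Int)) : List (String × String × Int × Int × Int) :=
  step1.foldl pvStepA []

-- ===== PORT B =====
-- split into maximal runs: each appended tuple's [0] equals cur[-1][1]
def pvRuns (cur : List (String × String × Int × Int × Int)) :
    List (String × String × Int × Int × Int) → List (List (String × String × Int × Int × Int))
  | [] => [cur]
  | w :: ws =>
    if w.1 = (cur.getLastD ("", "", 0, 0, 0)).2.1 then pvRuns (cur ++ [w]) ws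
    else cur :: pvRuns [w] ws

-- one output tuple per run: [0]=first[0], [1]=last[1], [2]=max over the run,
-- [3]=first[3]+sum of [4] over all but the last, [4]=last[4]
def pvSummarize (run : List (String × String × Int × Int × Int)) : String × String × Int × Int × Int :=
  match run with
  | [] => ("", "", 0, 0, 0)  -- unreachable: runs are nonempty
  | f :: rest =>
    (f.1, (rest.getLastD f).2.1,
     rest.foldl (fun m t => max m t.2.2.1) f.2.2.1,
     f.2.2.2.1 + ((f :: rest).dropLast.foldl (fun s t => s + t.2.2.2.2) 0),
     (rest.getLastD f).2.2.2.2)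

def gomajoin_alt (step1 : List (String × String × Int × Int × Int)) : List (String × String × Int × Int × Int) :=
  match step1 with
  | [] => []
  | x :: xs => (pvRuns [x] xs).map pvSummarize

-- ===== PRECONDITION & SPEC =====
def Spec_gomajoin (step1 : List (String × String × Int × Int × Int)) (out : List (String × String × Int × Int × Int)) : Prop := out = gomajoin_alt step1
instance (step1 : List (String × String × Int × Int × Int)) (out : List (String × String × Int × Int × Int)) : Decidable (Spec_gomajoin step1 out) := by unfold Spec_gomajoin; infer_instance

-- ===== CLAIM (what is proved, stated in full; the proofs are below) =====
def Claim_equal_gomajoin : Prop := ∀ (step1 : List (String × String × Int × Int × Int)), Dom_gomajoin step1 → Spec_gomajoin step1 (gomajoin step1)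

-- ===== LEMMAS AND PROOFS =====

theorem pvSummarize_single (w : String × String × Int × Int × Int) : pvSummarize [w] = w := by
  simp [pvSummarize]

-- the field A compares against (result[-1][1]) is the last run element's [1]
theorem pvSummarize_snd (f : String × String × Int × Int × Int)
    (rest : List (String × String × Int × Int × Int)) :
    (pvSummarize (f :: rest)).2.1 = (rest.getLastD f).2.1 := rfl

theorem foldl_add_concat (l : List (String × String × Int × Int × Int)) (w : String × String × Int × Int × Int) (s : Int) :
    (l ++ [w]).foldl (fun s t => s + t.2.2.2.2) s
      = l.foldl (fun s t => s + t.2.2.2.2) s + w.2.2.2.2 := by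
  simp [List.foldl_append]

-- sum of [4] over a nonempty list = sum over dropLast + last's [4]
theorem foldl_add_split (f : String × String × Int × Int × Int)
    (rest : List (String × String × Int × Int × Int)) :
    (f :: rest).foldl (fun s t => s + t.2.2.2.2) 0
      = (f :: rest).dropLast.foldl (fun s t => s + t.2.2.2.2) 0 + (rest.getLastD f).2.2.2.2 := by
  have h : (f :: rest).dropLast ++ [(f :: rest).getLast (by simp)] = f :: rest :=
    List.dropLast_concat_getLast (by simp)
  have h2 : (f :: rest).getLast (by simp) = rest.getLastD f := by
    simp [List.getLast_eq_getLastD]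
  calc (f :: rest).foldl (fun s t => s + t.2.2.2.2) 0
      = ((f :: rest).dropLast ++ [(f :: rest).getLast (by simp)]).foldl (fun s t => s + t.2.2.2.2) 0 := by
        rw [h]
    _ = (f :: rest).dropLast.foldl (fun s t => s + t.2.2.2.2) 0 + (rest.getLastD f).2.2.2.2 := by
        rw [foldl_add_concat, h2]

-- A's in-place merge computes the summary of the extended run (RHS fields written out)
theorem pvSummarize_concat (f : String × String × Int × Int × Int)
    (rest : List (String × String × Int × Int × Int)) (w : String × String × Int × Int × Int) :
    pvSummarize (f :: (rest ++ [w]))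
      = (f.1, w.2.1,
         max w.2.2.1 (rest.foldl (fun m t => max m t.2.2.1) f.2.2.1),
         (f.2.2.2.1 + (f :: rest).dropLast.foldl (fun s t => s + t.2.2.2.2) 0) + (rest.getLastD f).2.2.2.2,
         w.2.2.2.2) := by
  simp only [pvSummarize]
  refine Prod.ext rfl (Prod.ext ?_ (Prod.ext ?_ (Prod.ext ?_ ?_)))
  · show ((rest ++ [w]).getLastD f).2.1 = w.2.1
    simp [List.getLastD_eq_getLast?]
  · show (rest ++ [w]).foldl (fun m t => max m t.2.2.1) f.2.2.1
        = max w.2.2.1 (rest.foldl (fun m t => max m t.2.2.1) f.2.2.1)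
    simp [List.foldl_append, max_comm]
  · show f.2.2.2.1 + ((f :: (rest ++ [w])).dropLast.foldl (fun s t => s + t.2.2.2.2) 0)
        = (f.2.2.2.1 + (f :: rest).dropLast.foldl (fun s t => s + t.2.2.2.2) 0) + (rest.getLastD f).2.2.2.2
    rw [← List.cons_append, List.dropLast_concat, add_assoc]
    congr 1
    exact foldl_add_split f rest
  · show ((rest ++ [w]).getLastD f).2.2.2.2 = w.2.2.2.2
    simp [List.getLastD_eq_getLast?]

-- loop invariant: A's result is the finished summaries plus the summary of the open run
theorem loop_eq (xs : List (String × String × Int × Int × Int)) :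
    ∀ (done : List (String × String × Int × Int × Int))
      (f : String × String × Int × Int × Int) (rest : List (String × String × Int × Int × Int)),
    xs.foldl pvStepA (done ++ [pvSummarize (f :: rest)])
      = done ++ (pvRuns (f :: rest) xs).map pvSummarize := by
  induction xs with
  | nil => intro done f rest; simp [pvRuns]
  | cons w ws ih =>
    intro done f rest
    have hlast : (done ++ [pvSummarize (f :: rest)]).getLast? = some (pvSummarize (f :: rest)) := by
      simp
    rw [List.foldl_cons]
    by_cases hw : w.1 = (rest.getLastD f).2.1
    · have hstep : pvStepA (done ++ [pvSummarize (f :: rest)]) w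
          = done ++ [pvSummarize (f :: (rest ++ [w]))] := by
        simp only [pvStepA, hlast]
        rw [if_pos (hw.trans (pvSummarize_snd f rest).symm)]
        rw [List.dropLast_concat, pvSummarize_concat]
        rfl
      rw [hstep, ih done f (rest ++ [w])]
      have hr : pvRuns (f :: rest) (w :: ws) = pvRuns (f :: (rest ++ [w])) ws := by
        simp only [pvRuns, List.getLastD_cons, List.cons_append]
        rw [if_pos hw]
      rw [hr]
    · have hstep : pvStepA (done ++ [pvSummarize (f :: rest)]) w
          = (done ++ [pvSummarize (f :: rest)]) ++ [w] := by
        simp only [pvStepA, hlast]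
        rw [if_neg (fun h => hw (h.trans (pvSummarize_snd f rest)))]
      rw [hstep]
      conv_lhs => rw [show (w : String × String × Int × Int × Int) = pvSummarize [w] from (pvSummarize_single w).symm]
      rw [ih (done ++ [pvSummarize (f :: rest)]) w []]
      have hr : pvRuns (f :: rest) (w :: ws) = (f :: rest) :: pvRuns [w] ws := by
        simp only [pvRuns, List.getLastD_cons]
        rw [if_neg hw]
      rw [hr]
      simp

-- ===== VERDICT (by name: the statement is the Claim_ definition above) =====
theorem gomajoin_spec : Claim_equal_gomajoin := by
  intro step1 _
  unfold Spec_gomajoin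
  cases step1 with
  | nil => rfl
  | cons x xs =>
    have h0 : pvStepA [] x = [] ++ [pvSummarize [x]] := by
      simp [pvStepA, pvSummarize_single]
    calc gomajoin (x :: xs)
        = xs.foldl pvStepA (pvStepA [] x) := rfl
      _ = xs.foldl pvStepA ([] ++ [pvSummarize [x]]) := by rw [h0]
      _ = [] ++ (pvRuns [x] xs).map pvSummarize := loop_eq xs [] x []
      _ = gomajoin_alt (x :: xs) := by simp [gomajoin_alt]
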